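-- pv_equiv track=rewrite | github.com/Chopinsky/algo-problems | challenges/3999/3681-maximum-xor-of-subsequences.py | maxXorSubsequences
-- ===== SOURCE A (Python) =====
-- from typing import List
--
-- def maxXorSubsequences(nums: List[int]) -> int:
--   cand = sorted(set(nums))
--   if not cand:
--     return 0
--
--   res = 0
--   top = max(cand)
--
--   while top > 0:
--     res = max(res, res^top)
--     for i in range(len(cand)):
--       cand[i] = min(cand[i], cand[i]^top)
--
--     top = max(cand)
--
--   return res
-- ===== SOURCE B (Python) =====
-- from typing import List
--
-- def maxXorSubsequences(nums: List[int]) -> int: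
--   # Standard XOR linear basis (one pass, no sorting), then a greedy high-to-low pass.
--   # Negative values are ignored, matching A's `top > 0` gate.
--   top = max(nums, default=0)
--   if top <= 0:
--     return 0
--   nbits = top.bit_length()
--
--   basis = {}  # leading bit -> basis vector with that leading bit
--   for x in nums:
--     if x <= 0:
--       continue
--     for b in range(nbits - 1, -1, -1):
--       if not (x >> b) & 1:
--         continue
--       if b in basis:
--         x ^= basis[b]
--       else:
--         basis[b] = x
--         break
--
--   res = 0
--   for b in range(nbits - 1, -1, -1):
--     v = basis.get(b)
--     if v is not None and res ^ v > res:
--       res ^= v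
--   return res
-- ===== Notes on version B (the rewrite author's own statement) =====
-- stated objective: faster
-- what changed: A repeatedly takes the maximum of the whole candidate set and XOR-reduces every element against it (simultaneous Gaussian elimination over sorted(set(nums))); B builds the standard XOR linear basis indexed by leading bit in a single pass over the input and finishes with one greedy high-to-low pass over the at most 32 basis vectors.
import Mathlib
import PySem

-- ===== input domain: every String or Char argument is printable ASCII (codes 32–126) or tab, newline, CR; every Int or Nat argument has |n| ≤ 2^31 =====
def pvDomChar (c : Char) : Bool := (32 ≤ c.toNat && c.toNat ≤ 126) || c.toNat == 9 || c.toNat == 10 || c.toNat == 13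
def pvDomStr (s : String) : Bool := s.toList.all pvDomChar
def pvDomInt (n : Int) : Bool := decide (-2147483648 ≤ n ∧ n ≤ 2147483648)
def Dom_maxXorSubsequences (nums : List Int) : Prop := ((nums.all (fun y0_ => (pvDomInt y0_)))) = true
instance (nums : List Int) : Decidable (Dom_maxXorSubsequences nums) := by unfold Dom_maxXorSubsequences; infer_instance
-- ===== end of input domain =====

-- B replaces A's repeated take-the-maximum-and-reduce-everything sweep (on sorted(set(nums)))
-- by the standard XOR linear basis indexed by leading bit, built in one pass, plus one greedy
-- high-to-low pass; negatives never contribute in either version (A's `top > 0` gate).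

-- ===== PORT A =====

-- termination fact for A's `while top > 0` loop (cited by `decreasing_by`): every updated
-- element min(c, c^top) is < top, so the maximum strictly decreases
-- `cand[i] = min(cand[i], cand[i] ^ top)` applied to every index
def pvUpdate (top : Int) (cand : List Int) : List Int :=
  cand.map fun c => min c (PySem.Int.bxor c top)

theorem pvLoopA_measure (cand : List Int) (top : Int)
    (h : PySem.List.max? cand (fun y => y) = some top) (hpos : 0 < top) :
    ((PySem.List.max? (pvUpdate top cand) (fun y => y)).getD 0).toNat
      < ((PySem.List.max? cand (fun y => y)).getD 0).toNat := by
  rw [h]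
  cases hm : PySem.List.max? (pvUpdate top cand) (fun y => y) with
  | none => simp; omega
  | some m =>
    obtain ⟨c, hc, rfl⟩ := List.mem_map.1 (PySem.List.max?_mem (by simpa [pvUpdate] using hm))
    have hle : c ≤ top := PySem.List.max?_isMax h c hc
    have hlt : min c (PySem.Int.bxor c top) < top := by
      rcases eq_or_lt_of_le hle with rfl | hlt
      · simp [PySem.Int.bxor_self]; omega
      · exact lt_of_le_of_lt (min_le_left _ _) hlt
    simp; omega

-- `while top > 0: res = max(res, res^top); cand[i] = min(cand[i], cand[i]^top); top = max(cand)`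
def pvLoopA (cand : List Int) (res : Int) : Int :=
  match h : PySem.List.max? cand (fun y => y) with
  | none => res
  | some top =>
    if hpos : 0 < top then
      pvLoopA (pvUpdate top cand) (max res (PySem.Int.bxor res top))
    else res
termination_by ((PySem.List.max? cand (fun y => y)).getD 0).toNat
decreasing_by exact pvLoopA_measure cand top h hpos

def maxXorSubsequences (nums : List Int) : Int :=
  let cand := PySem.List.sorted (PySem.Set.ofList nums) (fun x => x)
  if cand = [] then 0
  else pvLoopA cand 0

-- ===== PORT B =====

-- inner `for b in range(nbits-1, -1, -1): …` of B, with its early `break`;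
-- `x >> b` is ported as `x >>> b.toNat` (exact: every b produced by the range is ≥ 0)
def pvInsertLoop (basis : PySem.Dict Int Int) (x : Int) : List Int → PySem.Dict Int Int
  | [] => basis
  | b :: bs =>
    if PySem.Int.band (x >>> b.toNat) 1 = 0 then pvInsertLoop basis x bs
    else
      match basis.get? b with
      | some v => pvInsertLoop basis (PySem.Int.bxor x v) bs
      | none => basis.insert b x

def maxXorSubsequences_alt (nums : List Int) : Int :=
  let top := (PySem.List.max? nums (fun y => y)).getD 0  -- max(nums, default=0)
  if top ≤ 0 then 0
  else
    let nbits : Nat := PySem.Int.bitLength top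
    let basis := nums.foldl (fun basis x =>
      if x ≤ 0 then basis
      else pvInsertLoop basis x (PySem.List.pyRange ((nbits : Int) - 1) (-1) (-1))) PySem.Dict.empty
    (PySem.List.pyRange ((nbits : Int) - 1) (-1) (-1)).foldl (fun res b =>
      match basis.get? b with
      | some v => if res < PySem.Int.bxor res v then PySem.Int.bxor res v else res
      | none => res) 0

-- ===== PRECONDITION & SPEC =====
def Spec_maxXorSubsequences (nums : List Int) (out : Int) : Prop := out = maxXorSubsequences_alt nums
instance (nums : List Int) (out : Int) : Decidable (Spec_maxXorSubsequences nums out) := by unfold Spec_maxXorSubsequences; infer_instance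

-- ===== CLAIM (what is proved, stated in full; the proofs are below) =====
def Claim_equal_maxXorSubsequences : Prop := ∀ (nums : List Int), Dom_maxXorSubsequences nums → Spec_maxXorSubsequences nums (maxXorSubsequences nums)


-- ===== LEMMAS AND PROOFS =====

/-! #### The positive entries of an integer list, as naturals.
Both programs' results depend only on the GF(2) span of these. -/

def pvN (l : List Int) : List Nat := l.filterMap (fun c => if 0 < c then some c.toNat else none)

theorem pv_mem_pvN {l : List Int} {u : Nat} : u ∈ pvN l ↔ ∃ c ∈ l, 0 < c ∧ c.toNat = u := by
  simp only [pvN, List.mem_filterMap]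
  constructor
  · rintro ⟨c, hc, h⟩
    by_cases h0 : 0 < c
    · simp only [if_pos h0, Option.some.injEq] at h; exact ⟨c, hc, h0, h⟩
    · simp [if_neg h0] at h
  · rintro ⟨c, hc, h0, h⟩; exact ⟨c, hc, by simp [if_pos h0, h]⟩

theorem pvN_cons_pos {c : Int} (h : 0 < c) (l : List Int) :
    pvN (c :: l) = c.toNat :: pvN l := by
  simp only [pvN, List.filterMap_cons, if_pos h]

theorem pvN_cons_nonpos {c : Int} (h : ¬ 0 < c) (l : List Int) :
    pvN (c :: l) = pvN l := by
  simp only [pvN, List.filterMap_cons, if_neg h]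

theorem pvN_nil_of_nonpos {l : List Int} (h : ∀ c ∈ l, c ≤ 0) : pvN l = [] := by
  simp only [pvN, List.filterMap_eq_nil_iff]
  intro c hc
  simp [show ¬ 0 < c by have := h c hc; omega]

/-! #### The GF(2) span of a list of naturals, as a finite set. -/

def pvSpan : List Nat → Finset Nat
  | [] => {0}
  | v :: l => pvSpan l ∪ (pvSpan l).image (· ^^^ v)

theorem pv_xor_left_comm (a b c : Nat) : a ^^^ (b ^^^ c) = b ^^^ (a ^^^ c) := by
  rw [← Nat.xor_assoc, Nat.xor_comm a b, Nat.xor_assoc]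

theorem pv_zero_mem (l : List Nat) : 0 ∈ pvSpan l := by
  induction l with
  | nil => simp [pvSpan]
  | cons v l ih => exact Finset.mem_union_left _ ih

theorem pv_mem_span_cons {x v : Nat} {l : List Nat} :
    x ∈ pvSpan (v :: l) ↔ x ∈ pvSpan l ∨ x ^^^ v ∈ pvSpan l := by
  simp only [pvSpan, Finset.mem_union, Finset.mem_image]
  constructor
  · rintro (h | ⟨s, hs, rfl⟩)
    · exact Or.inl h
    · right; simpa [Nat.xor_assoc] using hs
  · rintro (h | h)
    · exact Or.inl h
    · exact Or.inr ⟨x ^^^ v, h, by simp⟩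

theorem pv_xor_mem {l : List Nat} {a b : Nat} (ha : a ∈ pvSpan l) (hb : b ∈ pvSpan l) :
    a ^^^ b ∈ pvSpan l := by
  induction l generalizing a b with
  | nil =>
    simp only [pvSpan, Finset.mem_singleton] at *
    subst ha; subst hb; rfl
  | cons v l ih =>
    rw [pv_mem_span_cons] at ha hb ⊢
    rcases ha with ha | ha <;> rcases hb with hb | hb
    · exact Or.inl (ih ha hb)
    · right
      have h := ih ha hb
      rwa [← Nat.xor_assoc] at h
    · right
      have h := ih ha hb
      have : a ^^^ v ^^^ b = a ^^^ b ^^^ v := by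
        rw [Nat.xor_assoc, Nat.xor_assoc, Nat.xor_comm v b]
      rwa [this] at h
    · left
      have h := ih ha hb
      have : (a ^^^ v) ^^^ (b ^^^ v) = a ^^^ b := by
        rw [Nat.xor_assoc, pv_xor_left_comm v b v, Nat.xor_self, Nat.xor_zero]
      rwa [this] at h

theorem pv_mem_span_of_mem {l : List Nat} {v : Nat} (h : v ∈ l) : v ∈ pvSpan l := by
  induction l with
  | nil => cases h
  | cons w l ih =>
    rw [pv_mem_span_cons]
    rcases List.mem_cons.1 h with rfl | h
    · right; simpa using pv_zero_mem l
    · exact Or.inl (ih h)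

theorem pv_span_le {l m : List Nat} (h : ∀ v ∈ l, v ∈ pvSpan m) :
    ∀ x ∈ pvSpan l, x ∈ pvSpan m := by
  induction l with
  | nil =>
    intro x hx
    simp only [pvSpan, Finset.mem_singleton] at hx
    subst hx; exact pv_zero_mem m
  | cons v l ih =>
    intro x hx
    rw [pv_mem_span_cons] at hx
    have hv : v ∈ pvSpan m := h v (List.mem_cons_self ..)
    have hrest : ∀ w ∈ l, w ∈ pvSpan m := fun w hw => h w (List.mem_cons_of_mem _ hw)
    rcases hx with hx | hx
    · exact ih hrest x hx
    · have h1 := pv_xor_mem (ih hrest _ hx) hv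
      rwa [Nat.xor_assoc, Nat.xor_self, Nat.xor_zero] at h1

theorem pv_span_ext {l m : List Nat} (h : ∀ v, v ∈ l ↔ v ∈ m) : pvSpan l = pvSpan m := by
  apply Finset.ext
  intro x
  constructor
  · exact fun hx => pv_span_le (fun v hv => pv_mem_span_of_mem ((h v).1 hv)) x hx
  · exact fun hx => pv_span_le (fun v hv => pv_mem_span_of_mem ((h v).2 hv)) x hx

theorem pv_span_cons_of_mem {l : List Nat} {v : Nat} (h : v ∈ pvSpan l) :
    pvSpan (v :: l) = pvSpan l := by
  apply Finset.ext
  intro x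
  rw [pv_mem_span_cons]
  constructor
  · rintro (hx | hx)
    · exact hx
    · have h1 := pv_xor_mem hx h
      rwa [Nat.xor_assoc, Nat.xor_self, Nat.xor_zero] at h1
  · exact Or.inl

theorem pv_span_cons_congr {l m : List Nat} (h : pvSpan l = pvSpan m) (v : Nat) :
    pvSpan (v :: l) = pvSpan (v :: m) := by simp only [pvSpan, h]

theorem pv_span_swap (a b : Nat) (l : List Nat) : pvSpan (a :: b :: l) = pvSpan (b :: a :: l) := by
  apply Finset.ext
  intro x
  have key : ∀ y : Nat, y ^^^ a ^^^ b = y ^^^ b ^^^ a := by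
    intro y; rw [Nat.xor_assoc, Nat.xor_assoc, Nat.xor_comm a b]
  simp only [pv_mem_span_cons]
  rw [key]
  tauto

theorem pv_span_xor_cons {a b : Nat} {l : List Nat} (h : b ∈ pvSpan l) :
    pvSpan ((a ^^^ b) :: l) = pvSpan (a :: l) := by
  apply Finset.ext
  intro x
  rw [pv_mem_span_cons, pv_mem_span_cons]
  have h1 : ∀ y : Nat, y ^^^ (a ^^^ b) ∈ pvSpan l ↔ y ^^^ a ∈ pvSpan l := by
    intro y
    constructor
    · intro hy
      have h2 := pv_xor_mem hy h
      have : y ^^^ (a ^^^ b) ^^^ b = y ^^^ a := by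
        rw [Nat.xor_assoc, Nat.xor_assoc, Nat.xor_self, Nat.xor_zero]
      rwa [this] at h2
    · intro hy
      have h2 := pv_xor_mem hy h
      have : y ^^^ a ^^^ b = y ^^^ (a ^^^ b) := Nat.xor_assoc ..
      rwa [this] at h2
  rw [h1]

theorem pv_span_append_congr (a : List Nat) {m m' : List Nat} (h : pvSpan m = pvSpan m') :
    pvSpan (a ++ m) = pvSpan (a ++ m') := by
  induction a with
  | nil => exact h
  | cons v a ih => exact pv_span_cons_congr ih v

theorem pv_span_bound {l : List Nat} {k : Nat} (h : ∀ v ∈ l, v < 2 ^ k) :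
    ∀ x ∈ pvSpan l, x < 2 ^ k := by
  induction l with
  | nil =>
    intro x hx
    simp only [pvSpan, Finset.mem_singleton] at hx
    subst hx; exact Nat.two_pow_pos k
  | cons v l ih =>
    intro x hx
    rw [pv_mem_span_cons] at hx
    have hrest : ∀ w ∈ l, w < 2 ^ k := fun w hw => h w (List.mem_cons_of_mem _ hw)
    rcases hx with hx | hx
    · exact ih hrest x hx
    · have h1 := Nat.xor_lt_two_pow (ih hrest _ hx) (h v (List.mem_cons_self ..))
      rwa [Nat.xor_assoc, Nat.xor_self, Nat.xor_zero] at h1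

/-! #### Bit-comparison helpers. -/

theorem pv_testBit_of_bounds {x p : Nat} (h1 : 2 ^ p ≤ x) (h2 : x < 2 ^ (p + 1)) :
    x.testBit p = true := by
  rw [Nat.testBit_eq_decide_div_mod_eq]
  have hd : x / 2 ^ p = 1 := by
    apply Nat.div_eq_of_lt_le <;> rw [Nat.pow_succ] at * <;> omega
  simp [hd]

theorem pv_lt_of_testBit_false {x p : Nat} (h2 : x < 2 ^ (p + 1)) (h : x.testBit p = false) :
    x < 2 ^ p := by
  by_contra hle
  rw [not_lt] at hle
  rw [pv_testBit_of_bounds hle h2] at h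
  cases h

theorem pv_testBit_false_of_lt {x p j : Nat} (hx : x < 2 ^ p) (hj : p ≤ j) :
    x.testBit j = false :=
  Nat.testBit_lt_two_pow (lt_of_lt_of_le hx (Nat.pow_le_pow_right (by norm_num) hj))

/-! #### The greedy step: adding a vector whose leading bit dominates everything in S. -/

theorem pv_max_xor_bits (r t p : Nat) (ht : t.testBit p = true)
    (hthi : ∀ j, p < j → t.testBit j = false) :
    (max r (r ^^^ t)).testBit p = true ∧ (min r (r ^^^ t)).testBit p = false ∧
      ∀ j, p < j → (max r (r ^^^ t)).testBit j = (min r (r ^^^ t)).testBit j := by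
  have hagree : ∀ j, p < j → (r ^^^ t).testBit j = r.testBit j := by
    intro j hj; rw [Nat.testBit_xor, hthi j hj, Bool.xor_false]
  have hbit : (r ^^^ t).testBit p = !(r.testBit p) := by
    rw [Nat.testBit_xor, ht, Bool.xor_true]
  by_cases hr : r.testBit p
  · have hlt : r ^^^ t < r := Nat.lt_of_testBit p (by simp [hbit, hr]) hr hagree
    rw [max_eq_left hlt.le, min_eq_right hlt.le]
    exact ⟨hr, by simp [hbit, hr], fun j hj => (hagree j hj).symm⟩
  · have hr' : r.testBit p = false := by simpa using hr
    have hlt : r < r ^^^ t := Nat.lt_of_testBit p hr' (by simp [hbit, hr'])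
      (fun j hj => (hagree j hj).symm)
    rw [max_eq_right hlt.le, min_eq_left hlt.le]
    exact ⟨by simp [hbit, hr'], hr', hagree⟩

theorem pv_step (S : Finset Nat) (t p r : Nat) (ht : t.testBit p = true)
    (hthi : ∀ j, p < j → t.testBit j = false) (hS : ∀ s ∈ S, s < 2 ^ p) :
    (S ∪ S.image (· ^^^ t)).sup (fun s => r ^^^ s) = S.sup (fun s => max r (r ^^^ t) ^^^ s) := by
  obtain ⟨hM, hm, hagree⟩ := pv_max_xor_bits r t p ht hthi
  have hdom : ∀ s ∈ S, min r (r ^^^ t) ^^^ s ≤ max r (r ^^^ t) ^^^ s := by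
    intro s hs
    have hsb : ∀ j, p ≤ j → s.testBit j = false := fun j hj =>
      pv_testBit_false_of_lt (hS s hs) hj
    apply le_of_lt
    apply Nat.lt_of_testBit p
    · rw [Nat.testBit_xor, hm, hsb p le_rfl]; rfl
    · rw [Nat.testBit_xor, hM, hsb p le_rfl]; rfl
    · intro j hj; rw [Nat.testBit_xor, Nat.testBit_xor, hsb j hj.le, hagree j hj]
  have hmono := Finset.sup_mono_fun hdom
  have himg : S.sup ((fun s => r ^^^ s) ∘ (· ^^^ t)) = S.sup (fun s => (r ^^^ t) ^^^ s) := by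
    apply Finset.sup_congr rfl
    intro s _
    show r ^^^ (s ^^^ t) = (r ^^^ t) ^^^ s
    rw [Nat.xor_assoc, Nat.xor_comm s t]
  rw [Finset.sup_union, Finset.sup_image, himg]
  rcases le_total r (r ^^^ t) with hle | hle
  · rw [max_eq_right hle] at hmono ⊢
    rw [min_eq_left hle] at hmono
    exact sup_eq_right.2 hmono
  · rw [max_eq_left hle] at hmono ⊢
    rw [min_eq_right hle] at hmono
    exact sup_eq_left.2 hmono

/-! #### Greedy maximisation over an echelon list equals the sup of its span. -/

def pvGreedy (r : Nat) (l : List Nat) : Nat := l.foldl (fun r v => max r (r ^^^ v)) r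

def pvEch (l : List Nat) : Prop :=
  (∀ v ∈ l, 0 < v) ∧ l.Pairwise (fun a b => b < 2 ^ Nat.log2 a)

theorem pvGreedy_spec {l : List Nat} (h : pvEch l) (r : Nat) :
    pvGreedy r l = (pvSpan l).sup (fun s => r ^^^ s) := by
  induction l generalizing r with
  | nil => simp [pvGreedy, pvSpan]
  | cons v l ih =>
    obtain ⟨hpos, hpw⟩ := h
    have hv : 0 < v := hpos v (List.mem_cons_self ..)
    rw [List.pairwise_cons] at hpw
    have hvne : v ≠ 0 := hv.ne'
    have ht : v.testBit (Nat.log2 v) = true := Nat.testBit_log2 hvne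
    have hv2 : v < 2 ^ (Nat.log2 v + 1) := ((Nat.log2_eq_iff hvne).1 rfl).2
    have hthi : ∀ j, Nat.log2 v < j → v.testBit j = false := fun j hj =>
      Nat.testBit_lt_two_pow (lt_of_lt_of_le hv2 (Nat.pow_le_pow_right (by norm_num) hj))
    have hS : ∀ s ∈ pvSpan l, s < 2 ^ Nat.log2 v := pv_span_bound hpw.1
    rw [show pvGreedy r (v :: l) = pvGreedy (max r (r ^^^ v)) l from rfl]
    rw [ih ⟨fun w hw => hpos w (List.mem_cons_of_mem _ hw), hpw.2⟩ (max r (r ^^^ v))]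
    show _ = (pvSpan l ∪ (pvSpan l).image (· ^^^ v)).sup (fun s => r ^^^ s)
    exact (pv_step (pvSpan l) v (Nat.log2 v) r ht hthi hS).symm

/-! #### Side A: each iteration of the while-loop peels the maximum off the span. -/

theorem pv_min_cast {c top : Int} (hc : 0 ≤ c) (ht : 0 ≤ top) :
    min c (PySem.Int.bxor c top) = ((min c.toNat (c.toNat ^^^ top.toNat) : Nat) : Int) := by
  rw [PySem.Int.bxor_of_nonneg hc ht, Nat.cast_min]
  rw [Int.toNat_of_nonneg hc]

theorem pvSE (top : Int) (hpos : 0 < top) (cand : List Int) :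
    pvSpan (top.toNat :: pvN (pvUpdate top cand)) = pvSpan (top.toNat :: pvN cand) := by
  induction cand with
  | nil => rfl
  | cons c l ih =>
    have hupd : pvUpdate top (c :: l) = min c (PySem.Int.bxor c top) :: pvUpdate top l := rfl
    by_cases hc : 0 < c
    · have hmin := pv_min_cast hc.le hpos.le
      have hr : pvN (c :: l) = c.toNat :: pvN l := pvN_cons_pos hc l
      rcases Nat.eq_zero_or_pos (min c.toNat (c.toNat ^^^ top.toNat)) with hu | hu
      · have hct : c.toNat = top.toNat := by
          rcases Nat.min_eq_zero_iff.1 hu with h0 | h0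
          · omega
          · have := Nat.xor_eq_zero_iff.1 h0; omega
        have hl : pvN (pvUpdate top (c :: l)) = pvN (pvUpdate top l) := by
          rw [hupd, hmin, hu]
          exact pvN_cons_nonpos (by norm_num) _
        rw [hl, hr, hct, ih]
        exact (pv_span_cons_of_mem (pv_mem_span_of_mem (List.mem_cons_self ..))).symm
      · have hl : pvN (pvUpdate top (c :: l)) =
            min c.toNat (c.toNat ^^^ top.toNat) :: pvN (pvUpdate top l) := by
          rw [hupd, hmin, pvN_cons_pos (by exact_mod_cast hu) _, Int.toNat_natCast]
        rw [hl, hr, pv_span_swap, pv_span_swap top.toNat c.toNat]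
        rw [pv_span_cons_congr ih (min c.toNat (c.toNat ^^^ top.toNat))]
        rcases min_choice c.toNat (c.toNat ^^^ top.toNat) with hmc | hmc <;> rw [hmc]
        exact pv_span_xor_cons (pv_mem_span_of_mem (List.mem_cons_self ..))
    · have hl : pvN (pvUpdate top (c :: l)) = pvN (pvUpdate top l) := by
        rw [hupd]
        exact pvN_cons_nonpos (show ¬ 0 < min c (PySem.Int.bxor c top) by
          have := min_le_left c (PySem.Int.bxor c top); omega) _
      have hr : pvN (c :: l) = pvN l := pvN_cons_nonpos hc l
      rw [hl, hr]; exact ih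

theorem pvUpdate_bound (cand : List Int) (top : Int) (hpos : 0 < top)
    (hmax : ∀ c ∈ cand, c ≤ top) :
    ∀ u ∈ pvN (pvUpdate top cand), u < 2 ^ Nat.log2 top.toNat := by
  intro u hu
  rw [pv_mem_pvN] at hu
  obtain ⟨c', hc', h0, rfl⟩ := hu
  obtain ⟨c, hc, rfl⟩ := List.mem_map.1 hc'
  have hcpos : 0 < c := lt_of_lt_of_le h0 (min_le_left _ _)
  have htpos : 0 < top.toNat := by omega
  have htlt : top.toNat < 2 ^ (Nat.log2 top.toNat + 1) := ((Nat.log2_eq_iff htpos.ne').1 rfl).2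
  have hble : c.toNat ≤ top.toNat := by have := hmax c hc; omega
  rw [pv_min_cast hcpos.le hpos.le, Int.toNat_natCast]
  by_cases hb : c.toNat.testBit (Nat.log2 top.toNat)
  · refine lt_of_le_of_lt (min_le_right _ _) (pv_lt_of_testBit_false
      (Nat.xor_lt_two_pow (lt_of_le_of_lt hble htlt) htlt) ?_)
    rw [Nat.testBit_xor, hb, Nat.testBit_log2 htpos.ne']; rfl
  · exact lt_of_le_of_lt (min_le_left _ _)
      (pv_lt_of_testBit_false (lt_of_le_of_lt hble htlt) (by simpa using hb))

theorem pvLoopA_spec : ∀ (cand : List Int) (res : Int), 0 ≤ res →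
    pvLoopA cand res = (((pvSpan (pvN cand)).sup (fun s => res.toNat ^^^ s) : Nat) : Int) := by
  intro cand res
  induction cand, res using pvLoopA.induct with
  | case1 cand res hnone =>
    intro hres
    obtain rfl : cand = [] := (PySem.List.max?_eq_none_iff _ _).1 hnone
    rw [pvLoopA, hnone]
    show res = _
    simp [pvN, pvSpan, Int.toNat_of_nonneg hres]
  | case2 cand res top hsome hpos ih =>
    intro hres
    have hres' : 0 ≤ max res (PySem.Int.bxor res top) := le_trans hres (le_max_left _ _)
    rw [pvLoopA, hsome]
    show (if _ : 0 < top then pvLoopA (pvUpdate top cand) (max res (PySem.Int.bxor res top))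
      else res) = _
    rw [dif_pos hpos, ih hres']
    have h2 : (max res (PySem.Int.bxor res top)).toNat
        = max res.toNat (res.toNat ^^^ top.toNat) := by
      rw [PySem.Int.bxor_of_nonneg hres hpos.le]
      conv_lhs => rw [← Int.toNat_of_nonneg hres]
      rw [← Nat.cast_max, Int.toNat_natCast, Int.toNat_natCast]
    have htmem : top.toNat ∈ pvSpan (pvN cand) :=
      pv_mem_span_of_mem (pv_mem_pvN.2 ⟨top, PySem.List.max?_mem hsome, hpos, rfl⟩)
    have hspan : pvSpan (pvN cand) = pvSpan (top.toNat :: pvN (pvUpdate top cand)) := by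
      rw [pvSE top hpos cand, pv_span_cons_of_mem htmem]
    rw [hspan, h2]
    congr 1
    have htpos : 0 < top.toNat := by omega
    have htlt : top.toNat < 2 ^ (Nat.log2 top.toNat + 1) := ((Nat.log2_eq_iff htpos.ne').1 rfl).2
    have ht : top.toNat.testBit (Nat.log2 top.toNat) = true := Nat.testBit_log2 htpos.ne'
    have hthi : ∀ j, Nat.log2 top.toNat < j → top.toNat.testBit j = false := fun j hj =>
      Nat.testBit_lt_two_pow (lt_of_lt_of_le htlt (Nat.pow_le_pow_right (by norm_num) hj))
    have hS : ∀ s ∈ pvSpan (pvN (pvUpdate top cand)), s < 2 ^ Nat.log2 top.toNat :=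
      pv_span_bound (pvUpdate_bound cand top hpos (PySem.List.max?_isMax hsome))
    show _ = (pvSpan (pvN (pvUpdate top cand)) ∪
      (pvSpan (pvN (pvUpdate top cand))).image (· ^^^ top.toNat)).sup (fun s => res.toNat ^^^ s)
    exact (pv_step _ top.toNat (Nat.log2 top.toNat) res.toNat ht hthi hS).symm
  | case3 cand res top hsome hnpos =>
    intro hres
    rw [pvLoopA, hsome]
    show (if _ : 0 < top then pvLoopA (pvUpdate top cand) (max res (PySem.Int.bxor res top))
      else res) = _
    rw [dif_neg hnpos]
    have hnil : pvN cand = [] := pvN_nil_of_nonpos (fun c hc => by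
      have := PySem.List.max?_isMax hsome c hc; omega)
    show res = _
    simp [hnil, pvSpan, Int.toNat_of_nonneg hres]

theorem pvA_eq (nums : List Int) :
    maxXorSubsequences nums = (((pvSpan (pvN nums)).sup id : Nat) : Int) := by
  unfold maxXorSubsequences
  have hmem : ∀ v, v ∈ pvN (PySem.List.sorted (PySem.Set.ofList nums) (fun x => x)) ↔
      v ∈ pvN nums := by
    intro v
    rw [pv_mem_pvN, pv_mem_pvN]
    constructor
    · rintro ⟨c, hc, h0, h⟩
      exact ⟨c, (PySem.Set.mem_ofList nums c).1 ((PySem.List.mem_sorted _ _ _ c).1 hc), h0, h⟩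
    · rintro ⟨c, hc, h0, h⟩
      exact ⟨c, (PySem.List.mem_sorted _ _ _ c).2 ((PySem.Set.mem_ofList nums c).2 hc), h0, h⟩
  by_cases hnil : PySem.List.sorted (PySem.Set.ofList nums) (fun x => x) = []
  · rw [if_pos hnil]
    rw [PySem.List.sorted_eq_nil_iff] at hnil
    have hnums : nums = [] := by
      cases hn : nums with
      | nil => rfl
      | cons a l =>
        exfalso
        have ha : a ∈ PySem.Set.ofList nums := (PySem.Set.mem_ofList nums a).2 (by
          rw [hn]; exact List.mem_cons_self ..)
        rw [hnil] at ha
        simp at ha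
    subst hnums
    simp [pvN, pvSpan]
  · rw [if_neg hnil]
    rw [pvLoopA_spec _ 0 le_rfl]
    congr 1
    rw [pv_span_ext hmem]
    apply Finset.sup_congr rfl
    intro s _
    simp

/-! #### Side B: the linear-basis construction spans the same set. -/

def pvVals (basis : PySem.Dict Int Int) : List Nat :=
  (PySem.Dict.items basis).map (fun kv => kv.2.toNat)

def pvGoodB (nb : Nat) (basis : PySem.Dict Int Int) : Prop :=
  (PySem.Dict.keys basis).Nodup ∧
  ∀ p v, basis.get? p = some v →
    ∃ pn : Nat, p = (pn : Int) ∧ pn < nb ∧ 0 ≤ v ∧ 2 ^ pn ≤ v.toNat ∧ v.toNat < 2 ^ (pn + 1)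

theorem pv_mem_vals_of_get? {basis : PySem.Dict Int Int} {p v : Int}
    (hnd : (PySem.Dict.keys basis).Nodup) (h : basis.get? p = some v) :
    v.toNat ∈ pvVals basis := by
  have := (PySem.Dict.get?_eq_some_iff_mem_items basis p v hnd).1 h
  exact List.mem_map.2 ⟨(p, v), this, rfl⟩

theorem pvInsertLoop_spec (nb : Nat) :
    ∀ (k : Nat) (basis : PySem.Dict Int Int) (x : Int), k ≤ nb → pvGoodB nb basis → 0 ≤ x →
      x.toNat < 2 ^ k →
      pvGoodB nb (pvInsertLoop basis x (PySem.List.pyRange ((k : Int) - 1) (-1) (-1))) ∧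
      pvSpan (pvVals (pvInsertLoop basis x (PySem.List.pyRange ((k : Int) - 1) (-1) (-1))))
        = pvSpan (x.toNat :: pvVals basis) := by
  intro k
  induction k with
  | zero =>
    intro basis x hk hg hx hlt
    rw [PySem.List.pyRange_neg_one_eq_nil (by norm_num)]
    have h0 : x.toNat = 0 := by simpa using hlt
    rw [show pvInsertLoop basis x [] = basis from rfl, h0]
    exact ⟨hg, (pv_span_cons_of_mem (pv_zero_mem _)).symm⟩
  | succ k ih =>
    intro basis x hk hg hx hlt
    have hrange : PySem.List.pyRange (((k+1 : Nat) : Int) - 1) (-1) (-1)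
        = (k : Int) :: PySem.List.pyRange ((k : Int) - 1) (-1) (-1) := by
      have h1 : (((k+1 : Nat) : Int)) - 1 = (k : Int) := by push_cast; ring
      rw [h1, PySem.List.pyRange_neg_one_cons (by omega)]
    rw [hrange]
    have hsh : x >>> k = ((x.toNat >>> k : Nat) : Int) := by
      rw [Int.natCast_shiftRight, Int.toNat_of_nonneg hx]
    have hbit : (PySem.Int.band (x >>> k) 1 = 0) ↔ x.toNat.testBit k = false := by
      rw [hsh, show (1 : Int) = ((1 : Nat) : Int) from rfl, PySem.Int.band_natCast,
        Nat.and_one_is_mod, Nat.shiftRight_eq_div_pow, Nat.testBit_eq_decide_div_mod_eq]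
      rcases Nat.mod_two_eq_zero_or_one (x.toNat / 2 ^ k) with h | h <;> simp [h]
    simp only [pvInsertLoop, Int.toNat_natCast]
    by_cases hb : x.toNat.testBit k
    · rw [if_neg (by rw [hbit, hb]; simp)]
      cases hget : basis.get? (k : Int) with
      | some v =>
        obtain ⟨pn, hpk, hpn, hv0, hvlo, hvhi⟩ := hg.2 _ _ hget
        have hpnk : pn = k := by exact_mod_cast hpk.symm
        subst hpnk
        have hx' : 0 ≤ PySem.Int.bxor x v := by
          rw [PySem.Int.bxor_of_nonneg hx hv0]; exact Int.natCast_nonneg _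
        have hxN : (PySem.Int.bxor x v).toNat = x.toNat ^^^ v.toNat := by
          rw [PySem.Int.bxor_of_nonneg hx hv0, Int.toNat_natCast]
        have hxlt : (PySem.Int.bxor x v).toNat < 2 ^ pn := by
          rw [hxN]
          apply pv_lt_of_testBit_false (Nat.xor_lt_two_pow hlt hvhi)
          rw [Nat.testBit_xor, hb, pv_testBit_of_bounds hvlo hvhi]; rfl
        obtain ⟨hg', hsp⟩ := ih basis (PySem.Int.bxor x v) (le_trans (Nat.le_succ pn) hk) hg hx' hxlt
        refine ⟨hg', ?_⟩
        rw [hsp, hxN]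
        exact pv_span_xor_cons (pv_mem_span_of_mem (pv_mem_vals_of_get? hg.1 hget))
      | none =>
        have hni : basis.contains (k : Int) = false := by
          rw [PySem.Dict.contains_eq_isSome_get?, hget]; rfl
        constructor
        · constructor
          · rw [PySem.Dict.keys_insert_of_not_contains _ _ hni]
            exact List.Nodup.append hg.1 (List.nodup_singleton _)
              (by
                intro a ha hb'
                simp only [List.mem_singleton] at hb'
                subst hb'
                have : basis.contains (k : Int) = true := by
                  rw [PySem.Dict.contains_iff_mem_keys]; exact ha
                rw [hni] at this; cases this)
          · intro p v hpv
            by_cases hpk : p = (k : Int)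
            · subst hpk
              rw [PySem.Dict.get?_insert_self] at hpv
              cases hpv
              exact ⟨k, rfl, by omega, hx, Nat.ge_two_pow_of_testBit hb, hlt⟩
            · rw [PySem.Dict.get?_insert_of_ne _ _ hpk] at hpv
              exact hg.2 _ _ hpv
        · have hvi : pvVals (basis.insert (k : Int) x) = pvVals basis ++ [x.toNat] := by
            unfold pvVals
            rw [PySem.Dict.items_insert_of_not_contains _ _ hni, List.map_append]
            rfl
          rw [hvi]
          exact pv_span_ext (by intro v; simp [List.mem_append]; tauto)
    · rw [if_pos (hbit.2 (by simpa using hb))]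
      exact ih basis x (le_trans (Nat.le_succ k) hk) hg hx
        (pv_lt_of_testBit_false hlt (by simpa using hb))

theorem pvBuild_spec (nb : Nat) :
    ∀ (l : List Int) (basis : PySem.Dict Int Int), pvGoodB nb basis →
      (∀ x ∈ l, 0 < x → x.toNat < 2 ^ nb) →
      pvGoodB nb (l.foldl (fun basis x => if x ≤ 0 then basis
        else pvInsertLoop basis x (PySem.List.pyRange ((nb : Int) - 1) (-1) (-1))) basis) ∧
      pvSpan (pvVals (l.foldl (fun basis x => if x ≤ 0 then basis
        else pvInsertLoop basis x (PySem.List.pyRange ((nb : Int) - 1) (-1) (-1))) basis))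
        = pvSpan (pvN l ++ pvVals basis) := by
  intro l
  induction l with
  | nil => intro basis hg _; exact ⟨hg, rfl⟩
  | cons x l ih =>
    intro basis hg hbound
    rw [List.foldl_cons]
    by_cases hx : x ≤ 0
    · rw [if_pos hx]
      have h1 : pvN (x :: l) = pvN l := by
        simp only [pvN, List.filterMap_cons, if_neg (show ¬ 0 < x by omega)]
      rw [h1]
      exact ih basis hg (fun y hy => hbound y (List.mem_cons_of_mem _ hy))
    · rw [if_neg hx]
      rw [not_le] at hx
      obtain ⟨hg', hsp⟩ := pvInsertLoop_spec nb nb basis x le_rfl hg hx.le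
        (hbound x (List.mem_cons_self ..) hx)
      obtain ⟨hg'', hsp'⟩ := ih _ hg' (fun y hy => hbound y (List.mem_cons_of_mem _ hy))
      refine ⟨hg'', ?_⟩
      rw [hsp', pv_span_append_congr (pvN l) hsp]
      have h1 : pvN (x :: l) = x.toNat :: pvN l := by
        simp only [pvN, List.filterMap_cons, if_pos hx]
      rw [h1]
      exact pv_span_ext (by intro v; simp [List.mem_append]; tauto)

theorem pv_greedy_int (l : List Int) (hpos : ∀ v ∈ l, 0 ≤ v) :
    ∀ r : Nat, l.foldl (fun res v => if res < PySem.Int.bxor res v then PySem.Int.bxor res v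
        else res) (r : Int)
      = ((pvGreedy r (l.map Int.toNat) : Nat) : Int) := by
  induction l with
  | nil => intro r; rfl
  | cons v l ih =>
    intro r
    have hv : 0 ≤ v := hpos v (List.mem_cons_self ..)
    have hbx : PySem.Int.bxor (r : Int) v = ((r ^^^ v.toNat : Nat) : Int) := by
      calc PySem.Int.bxor (r : Int) v = PySem.Int.bxor (r : Int) (v.toNat : Int) := by
            rw [Int.toNat_of_nonneg hv]
        _ = ((r ^^^ v.toNat : Nat) : Int) := PySem.Int.bxor_natCast r v.toNat
    rw [List.foldl_cons, hbx]
    have hstep : (if (r : Int) < ((r ^^^ v.toNat : Nat) : Int) then ((r ^^^ v.toNat : Nat) : Int)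
        else (r : Int)) = ((max r (r ^^^ v.toNat) : Nat) : Int) := by
      rcases Nat.lt_or_ge r (r ^^^ v.toNat) with h | h
      · rw [if_pos (by exact_mod_cast h), max_eq_right h.le]
      · rw [if_neg (by exact_mod_cast not_lt.2 h), max_eq_left h]
    rw [hstep, ih (fun w hw => hpos w (List.mem_cons_of_mem _ hw))]
    rfl

theorem pv_fold_lookup (basis : PySem.Dict Int Int) :
    ∀ (bs : List Int) (r : Int), bs.foldl (fun res b => match basis.get? b with
      | some v => if res < PySem.Int.bxor res v then PySem.Int.bxor res v else res
      | none => res) r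
    = (bs.filterMap (fun b => basis.get? b)).foldl
        (fun res v => if res < PySem.Int.bxor res v then PySem.Int.bxor res v else res) r := by
  intro bs
  induction bs with
  | nil => intro r; rfl
  | cons b bs ih =>
    intro r
    rw [List.foldl_cons, List.filterMap_cons]
    cases h : basis.get? b with
    | none => exact ih r
    | some v => exact ih _

theorem pvFinal_spec (nb : Nat) (basis : PySem.Dict Int Int) (hg : pvGoodB nb basis) :
    (PySem.List.pyRange ((nb : Int) - 1) (-1) (-1)).foldl (fun res b =>
      match basis.get? b with
      | some v => if res < PySem.Int.bxor res v then PySem.Int.bxor res v else res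
      | none => res) 0
    = (((pvSpan (pvVals basis)).sup id : Nat) : Int) := by
  have h1 : (PySem.List.pyRange ((nb : Int) - 1) (-1) (-1)).foldl (fun res b =>
      match basis.get? b with
      | some v => if res < PySem.Int.bxor res v then PySem.Int.bxor res v else res
      | none => res) 0
    = ((PySem.List.pyRange ((nb : Int) - 1) (-1) (-1)).filterMap (fun b => basis.get? b)).foldl
        (fun res v => if res < PySem.Int.bxor res v then PySem.Int.bxor res v else res) 0 :=
    pv_fold_lookup basis _ 0
  set E := (PySem.List.pyRange ((nb : Int) - 1) (-1) (-1)).filterMap (fun b => basis.get? b)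
    with hE
  have hEmem : ∀ v ∈ E, ∃ pn : Nat, basis.get? (pn : Int) = some v ∧ pn < nb ∧ 0 ≤ v ∧
      2 ^ pn ≤ v.toNat ∧ v.toNat < 2 ^ (pn + 1) := by
    intro v hv
    rw [hE, List.mem_filterMap] at hv
    obtain ⟨b, _, hb⟩ := hv
    obtain ⟨pn, rfl, h2, h3, h4, h5⟩ := hg.2 _ _ hb
    exact ⟨pn, hb, h2, h3, h4, h5⟩
  have hEpos : ∀ v ∈ E, 0 ≤ v := fun v hv => (hEmem v hv).choose_spec.2.2.1
  have h2 : E.foldl (fun res v => if res < PySem.Int.bxor res v then PySem.Int.bxor res v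
      else res) 0 = ((pvGreedy 0 (E.map Int.toNat) : Nat) : Int) := by
    have h := pv_greedy_int E hEpos 0
    simpa using h
  have hEch : pvEch (E.map Int.toNat) := by
    constructor
    · intro u hu
      obtain ⟨v, hv, rfl⟩ := List.mem_map.1 hu
      obtain ⟨pn, _, _, _, h4, _⟩ := hEmem v hv
      have := Nat.two_pow_pos pn
      omega
    · rw [List.pairwise_map, hE, List.pairwise_filterMap]
      have hgt : (PySem.List.pyRange ((nb : Int) - 1) (-1) (-1)).Pairwise (· > ·) := by
        rw [PySem.List.pyRange_neg_one_eq_reverse, List.pairwise_reverse]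
        exact PySem.List.pairwise_lt_pyRange_one _ _
      refine hgt.imp ?_
      intro a a' hgtaa v hv v' hv'
      obtain ⟨pn, hpa, _, _, hlo, hhi⟩ := hg.2 _ _ hv
      obtain ⟨pn', hpa', _, _, hlo', hhi'⟩ := hg.2 _ _ hv'
      have hlog : Nat.log2 v.toNat = pn := by
        have hvne : v.toNat ≠ 0 := by have := Nat.two_pow_pos pn; omega
        exact (Nat.log2_eq_iff hvne).2 ⟨hlo, hhi⟩
      rw [hlog]
      have hpn : pn' < pn := by rw [hpa, hpa'] at hgtaa; exact_mod_cast hgtaa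
      exact lt_of_lt_of_le hhi' (Nat.pow_le_pow_right (by norm_num) hpn)
  have hspmem : ∀ u, u ∈ E.map Int.toNat ↔ u ∈ pvVals basis := by
    intro u
    constructor
    · intro hu
      obtain ⟨v, hv, rfl⟩ := List.mem_map.1 hu
      rw [hE, List.mem_filterMap] at hv
      obtain ⟨b, _, hb⟩ := hv
      exact pv_mem_vals_of_get? hg.1 hb
    · intro hu
      obtain ⟨kv, hkv, rfl⟩ := List.mem_map.1 hu
      have hget : basis.get? kv.1 = some kv.2 :=
        (PySem.Dict.get?_eq_some_iff_mem_items basis kv.1 kv.2 hg.1).2 (by simpa using hkv)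
      obtain ⟨pn, hpk, hpn, _, _, _⟩ := hg.2 _ _ hget
      refine List.mem_map.2 ⟨kv.2, ?_, rfl⟩
      rw [hE, List.mem_filterMap]
      refine ⟨kv.1, ?_, hget⟩
      rw [PySem.List.mem_pyRange_neg_one, hpk]
      constructor <;> omega
  rw [h1, h2, pvGreedy_spec hEch 0]
  congr 1
  rw [pv_span_ext hspmem]
  apply Finset.sup_congr rfl
  intro s _
  simp

theorem pvB_eq (nums : List Int) :
    maxXorSubsequences_alt nums = (((pvSpan (pvN nums)).sup id : Nat) : Int) := by
  unfold maxXorSubsequences_alt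
  by_cases hle : (PySem.List.max? nums (fun y => y)).getD 0 ≤ 0
  · rw [if_pos hle]
    have hnil : pvN nums = [] := by
      apply pvN_nil_of_nonpos
      intro c hc
      cases hm : PySem.List.max? nums (fun y => y) with
      | none =>
        rw [(PySem.List.max?_eq_none_iff _ _).1 hm] at hc
        simp at hc
      | some m =>
        have h1 : c ≤ m := PySem.List.max?_isMax hm c hc
        rw [hm, Option.getD_some] at hle
        omega
    rw [hnil]
    simp [pvSpan]
  · rw [if_neg hle]
    rw [not_le] at hle
    cases hm : PySem.List.max? nums (fun y => y) with
    | none => rw [hm] at hle; simp at hle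
    | some m =>
    simp only [hm, Option.getD_some] at hle ⊢
    have hmlt : m.toNat < 2 ^ PySem.Int.bitLength m := by
      have h := PySem.Int.lt_two_pow_bitLength m
      omega
    have hbound : ∀ x ∈ nums, 0 < x → x.toNat < 2 ^ PySem.Int.bitLength m := by
      intro x hx h0
      have h1 : x ≤ m := PySem.List.max?_isMax hm x hx
      omega
    have hg0 : pvGoodB (PySem.Int.bitLength m) PySem.Dict.empty := by
      constructor
      · rw [PySem.Dict.keys_empty]; exact List.nodup_nil
      · intro p v h
        rw [PySem.Dict.get?_empty] at h
        cases h
    obtain ⟨hg, hsp⟩ := pvBuild_spec (PySem.Int.bitLength m) nums PySem.Dict.empty hg0 hbound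
    rw [pvFinal_spec (PySem.Int.bitLength m) _ hg, hsp]
    have hve : pvVals PySem.Dict.empty = [] := rfl
    rw [hve, List.append_nil]

theorem pv_main (nums : List Int) : maxXorSubsequences nums = maxXorSubsequences_alt nums := by
  rw [pvA_eq, pvB_eq]

-- ===== VERDICT (by name: the statement is the Claim_ definition above) =====
theorem maxXorSubsequences_spec : Claim_equal_maxXorSubsequences := by
  intro nums _
  unfold Spec_maxXorSubsequences
  exact pv_main nums
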